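-- pv_equiv track=rewrite | github.com/shubhamkaushal765/ac_roster | archive/main.py | compute_sos_segments
-- ===== SOURCE A (Python) =====
-- def compute_sos_segments(schedule: list[int]) -> list[tuple[int,int]]:
--     segs = []
--     i = 0
--     L = len(schedule)
--     while i < L:
--         if schedule[i] == -1:
--             j = i
--             while j + 1 < L and schedule[j + 1] == -1:
--                 j += 1
--             segs.append((i, j))
--             i = j + 1
--         else:
--             i += 1
--     return segs
-- ===== SOURCE B (Python) =====
-- def compute_sos_segments(schedule: list[int]) -> list[tuple[int, int]]:
--     # One-pass state machine: track the start of the current -1 run (or None).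
--     segs = []
--     run_start = None
--     for i, v in enumerate(schedule):
--         if v == -1:
--             if run_start is None:
--                 run_start = i
--         elif run_start is not None:
--             segs.append((run_start, i - 1))
--             run_start = None
--     if run_start is not None:
--         segs.append((run_start, len(schedule) - 1))
--     return segs
-- ===== Notes on version B (the rewrite author's own statement) =====
-- stated objective: simpler
-- what changed: Replaced A's nested while-loops (inner forward scan to find each run's end, index jumping) with a single linear pass that tracks the current -1 run's start in a state variable and emits a segment when the run ends.
import Mathlib
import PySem

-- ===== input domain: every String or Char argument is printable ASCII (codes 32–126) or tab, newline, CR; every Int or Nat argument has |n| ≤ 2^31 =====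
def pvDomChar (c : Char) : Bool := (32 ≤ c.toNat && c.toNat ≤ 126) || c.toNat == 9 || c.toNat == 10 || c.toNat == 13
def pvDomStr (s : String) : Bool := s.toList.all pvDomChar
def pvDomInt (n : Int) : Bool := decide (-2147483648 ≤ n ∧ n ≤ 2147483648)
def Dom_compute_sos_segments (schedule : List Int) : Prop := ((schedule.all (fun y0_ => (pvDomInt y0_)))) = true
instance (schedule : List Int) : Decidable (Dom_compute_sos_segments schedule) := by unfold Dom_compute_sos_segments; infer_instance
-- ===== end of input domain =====

-- B is a simpler single-pass state machine (run-start tracking) replacing A's nested scans; same O(n) cost.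

-- ===== PORT A =====
-- inner while loop: 'while j + 1 < L and schedule[j + 1] == -1: j += 1'
-- (indices are always in range here, so list indexing is ported with getD; exact on all inputs)
def aScanJ (schedule : List Int) (L : Nat) (j : Nat) : Nat :=
  if _h : j + 1 < L ∧ schedule.getD (j + 1) 0 = -1 then aScanJ schedule L (j + 1) else j
termination_by L - j

-- the inner scan never moves backwards (used for termination of the outer loop)
theorem aScanJ_ge (schedule : List Int) (L j : Nat) : j ≤ aScanJ schedule L j := by
  unfold aScanJ
  split
  · exact le_trans (Nat.le_succ j) (aScanJ_ge schedule L (j + 1))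
  · exact le_refl j
termination_by L - j

-- outer while loop of A
def aLoop (schedule : List Int) (L : Nat) (i : Nat) (segs : List (Int × Int)) : List (Int × Int) :=
  if _h : i < L then
    if schedule.getD i 0 = -1 then
      let j := aScanJ schedule L i
      aLoop schedule L (j + 1) (segs ++ [((i : Int), (j : Int))])
    else
      aLoop schedule L (i + 1) segs
  else
    segs
termination_by L - i
decreasing_by
  · have := aScanJ_ge schedule L i; omega
  · omega

def compute_sos_segments (schedule : List Int) : List (Int × Int) :=
  aLoop schedule schedule.length 0 []

-- ===== PORT B =====
-- 'for i, v in enumerate(schedule)' with state (segs, run_start)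
def bLoop (l : List Int) (i : Int) (segs : List (Int × Int)) (rs : Option Int) :
    List (Int × Int) × Option Int :=
  match l with
  | [] => (segs, rs)
  | v :: tl =>
    if v = -1 then
      match rs with
      | none => bLoop tl (i + 1) segs (some i)
      | some _ => bLoop tl (i + 1) segs rs
    else
      match rs with
      | some r => bLoop tl (i + 1) (segs ++ [(r, i - 1)]) none
      | none => bLoop tl (i + 1) segs rs

def compute_sos_segments_alt (schedule : List Int) : List (Int × Int) :=
  let p := bLoop schedule 0 [] none
  match p.2 with
  | some r => p.1 ++ [(r, (schedule.length : Int) - 1)]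
  | none => p.1

-- ===== PRECONDITION & SPEC =====
def Spec_compute_sos_segments (schedule : List Int) (out : List (Int × Int)) : Prop := out = compute_sos_segments_alt schedule
instance (schedule : List Int) (out : List (Int × Int)) : Decidable (Spec_compute_sos_segments schedule out) := by unfold Spec_compute_sos_segments; infer_instance

-- ===== CLAIM (what is proved, stated in full; the proofs are below) =====
def Claim_equal_compute_sos_segments : Prop := ∀ (schedule : List Int), Dom_compute_sos_segments schedule → Spec_compute_sos_segments schedule (compute_sos_segments schedule)

-- ===== LEMMAS AND PROOFS =====

-- reference decomposition: the list of maximal -1 runs of l, offset by absolute index i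
def G (l : List Int) (i : Int) : List (Int × Int) :=
  match l with
  | [] => []
  | v :: tl =>
    if v = -1 then
      let t := (tl.takeWhile (fun x => x == -1)).length
      (i, i + t) :: G (tl.drop t) (i + t + 1)
    else
      G tl (i + 1)
termination_by l.length
decreasing_by
  · simp
  · simp

theorem G_nil (i : Int) : G [] i = [] := by conv_lhs => unfold G

theorem G_cons_neg (v : Int) (tl : List Int) (i : Int) (hv : v ≠ -1) :
    G (v :: tl) i = G tl (i + 1) := by
  conv_lhs => unfold G
  simp [hv]

theorem G_cons_pos (tl : List Int) (i : Int) :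
    G (-1 :: tl) i =
      ((i, i + (tl.takeWhile (fun x => x == -1)).length) ::
        G (tl.drop (tl.takeWhile (fun x => x == -1)).length)
          (i + (tl.takeWhile (fun x => x == -1)).length + 1)) := by
  conv_lhs => unfold G
  simp

-- closing step of B (the trailing 'if run_start is not None' in Source B)
def bFinish (p : List (Int × Int) × Option Int) (e : Int) : List (Int × Int) :=
  match p.2 with
  | some r => p.1 ++ [(r, e)]
  | none => p.1

theorem aScanJ_eq (schedule : List Int) (j : Nat) :
    aScanJ schedule schedule.length j =
      j + ((schedule.drop (j + 1)).takeWhile (fun x => x == -1)).length := by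
  unfold aScanJ
  split
  · rename_i h
    obtain ⟨hj, hv⟩ := h
    have hd : schedule.drop (j + 1) = schedule[j + 1] :: schedule.drop (j + 1 + 1) :=
      List.drop_eq_getElem_cons hj
    have hg : schedule[j + 1] = (-1 : Int) := by
      rw [← List.getD_eq_getElem schedule 0 hj]; exact hv
    rw [aScanJ_eq schedule (j + 1), hd,
      List.takeWhile_cons_of_pos (by simp [hg])]
    simp
    omega
  · rename_i h
    rcases Nat.lt_or_ge (j + 1) schedule.length with hj | hj
    · have hv : ¬ schedule.getD (j + 1) 0 = -1 := by tauto
      have hd : schedule.drop (j + 1) = schedule[j + 1] :: schedule.drop (j + 1 + 1) :=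
        List.drop_eq_getElem_cons hj
      have hg : schedule[j + 1] ≠ (-1 : Int) := by
        rw [← List.getD_eq_getElem schedule 0 hj]; exact hv
      rw [hd, List.takeWhile_cons_of_neg (by simp [hg])]
      simp
    · rw [List.drop_eq_nil_of_le hj]
      simp
termination_by schedule.length - j

-- B's loop, run from state (segs, none) on suffix l at absolute index i,
-- then closed at the final end index, yields segs ++ G l i; from a
-- (segs, some r) state the open run is closed using the leading -1 count of l.
theorem bLoop_spec (l : List Int) :
    (∀ (i : Int) (segs : List (Int × Int)),
        bFinish (bLoop l i segs none) (i + l.length - 1) = segs ++ G l i) ∧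
    (∀ (i : Int) (segs : List (Int × Int)) (r : Int),
        bFinish (bLoop l i segs (some r)) (i + l.length - 1) =
          segs ++ (r, i + (l.takeWhile (fun x => x == -1)).length - 1) ::
            G (l.drop (l.takeWhile (fun x => x == -1)).length)
              (i + (l.takeWhile (fun x => x == -1)).length)) := by
  induction l with
  | nil =>
    constructor
    · intro i segs; simp [bLoop, bFinish, G_nil]
    · intro i segs r; simp [bLoop, bFinish, G_nil]
  | cons v tl ih =>
    obtain ⟨ihn, ihs⟩ := ih
    have he : ∀ i : Int, i + ((v :: tl).length : Int) - 1 = (i + 1) + tl.length - 1 := by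
      intro i; simp; omega
    constructor
    · intro i segs
      by_cases hv : v = -1
      · subst hv
        have h1 : bLoop (-1 :: tl) i segs none = bLoop tl (i + 1) segs (some i) := by
          simp [bLoop]
        rw [h1, he i, ihs (i + 1) segs i, G_cons_pos]
        congr 2
        · congr 1; omega
        · congr 1; omega
      · have h1 : bLoop (v :: tl) i segs none = bLoop tl (i + 1) segs none := by
          simp [bLoop, hv]
        rw [h1, he i, ihn (i + 1) segs, G_cons_neg v tl i hv]
    · intro i segs r
      by_cases hv : v = -1
      · subst hv
        have h1 : bLoop (-1 :: tl) i segs (some r) = bLoop tl (i + 1) segs (some r) := by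
          simp [bLoop]
        have ht : ((-1 :: tl : List Int).takeWhile (fun x => x == -1)) =
            -1 :: tl.takeWhile (fun x => x == -1) :=
          List.takeWhile_cons_of_pos (by simp)
        rw [h1, he i, ihs (i + 1) segs r, ht]
        have hdrop : ((-1 : Int) :: tl).drop ((tl.takeWhile (fun x => x == -1)).length + 1) =
            tl.drop (tl.takeWhile (fun x => x == -1)).length := by simp
        simp only [List.length_cons, hdrop]
        congr 2
        · congr 1; push_cast; ring
        · congr 1; push_cast; ring
      · have h1 : bLoop (v :: tl) i segs (some r) =
            bLoop tl (i + 1) (segs ++ [(r, i - 1)]) none := by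
          simp [bLoop, hv]
        have ht : ((v :: tl).takeWhile (fun x => x == -1)) = [] :=
          List.takeWhile_cons_of_neg (by simp [hv])
        rw [h1, he i, ihn (i + 1) (segs ++ [(r, i - 1)]), ht]
        simp [G_cons_neg v tl i hv]

-- A's outer loop computes segs ++ G (drop i schedule) i
theorem aLoop_spec (schedule : List Int) (i : Nat) (segs : List (Int × Int)) :
    aLoop schedule schedule.length i segs = segs ++ G (schedule.drop i) (i : Int) := by
  unfold aLoop
  split
  · rename_i hi
    have hd : schedule.drop i = schedule[i] :: schedule.drop (i + 1) :=
      List.drop_eq_getElem_cons hi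
    have hgd : schedule.getD i 0 = schedule[i] := List.getD_eq_getElem schedule 0 hi
    by_cases hv : schedule[i] = (-1 : Int)
    · rw [if_pos (by rw [hgd]; exact hv)]
      set t := ((schedule.drop (i + 1)).takeWhile (fun x => x == -1)).length with ht
      have hj : aScanJ schedule schedule.length i = i + t := aScanJ_eq schedule i
      have hrec := aLoop_spec schedule (aScanJ schedule schedule.length i + 1)
        (segs ++ [((i : Int), (aScanJ schedule schedule.length i : Int))])
      rw [hrec, hj]
      have hG : G (schedule.drop i) (i : Int) =
          ((i : Int), (i : Int) + t) ::
            G ((schedule.drop (i + 1)).drop t) ((i : Int) + t + 1) := by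
        rw [hd, hv, G_cons_pos, ← ht]
      rw [hG]
      have hdd : (schedule.drop (i + 1)).drop t = schedule.drop (i + t + 1) := by
        rw [List.drop_drop]; congr 1; omega
      rw [hdd]
      simp
    · rw [if_neg (by rw [hgd]; exact hv)]
      rw [aLoop_spec schedule (i + 1) segs]
      rw [hd, G_cons_neg _ _ _ hv]
      norm_cast
  · rename_i hi
    rw [List.drop_eq_nil_of_le (by omega)]
    simp [G_nil]
termination_by schedule.length - i
decreasing_by
  · have := aScanJ_ge schedule schedule.length i; omega
  · omega

-- ===== VERDICT (by name: the statement is the Claim_ definition above) =====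
theorem compute_sos_segments_spec : Claim_equal_compute_sos_segments := by
  intro schedule _
  unfold Spec_compute_sos_segments compute_sos_segments compute_sos_segments_alt
  have hb := (bLoop_spec schedule).1 0 []
  have ha := aLoop_spec schedule 0 []
  simp at ha hb
  rw [ha, ← hb]
  simp [bFinish]
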